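-- pv_equiv track=rewrite | github.com/ixs2874/Lottery | lottery_teamwork.py | existing_nums
-- ===== SOURCE A (Python) =====
-- def existing_nums(nums):
--     """Formats a string for existing numbers.
--     :param nums: list of numbers.
--     :return: formatted string.
--     """
--     result = ''
--     for i, n in enumerate(nums):
--         if i == 0:
--             result = " excluding " + str(n)
--         elif i < len(nums) - 1:
--             result += ", " + str(n)
--         else:
--             result += " and " + str(n) if len(nums) == 2 else ", and " + str(n)
--     return result
-- ===== SOURCE B (Python) =====
-- def existing_nums(nums):
--     """Formats a string for existing numbers.
--     :param nums: list of numbers.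
--     :return: formatted string.
--     """
--     if not nums:
--         return ''
--     parts = [str(n) for n in nums]
--     if len(parts) == 1:
--         return " excluding " + parts[0]
--     if len(parts) == 2:
--         return " excluding " + parts[0] + " and " + parts[1]
--     return " excluding " + parts[0] + ", " + ", ".join(parts[1:-1]) + ", and " + parts[-1]
-- ===== Notes on version B (the rewrite author's own statement) =====
-- stated objective: simpler
-- what changed: Replaced the index-branching enumerate loop with up-front length case analysis: empty guard, then direct formulas for 1 and 2 elements, and a ', '.join over the interior slice plus ', and ' + last for 3 or more.
import Mathlib
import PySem

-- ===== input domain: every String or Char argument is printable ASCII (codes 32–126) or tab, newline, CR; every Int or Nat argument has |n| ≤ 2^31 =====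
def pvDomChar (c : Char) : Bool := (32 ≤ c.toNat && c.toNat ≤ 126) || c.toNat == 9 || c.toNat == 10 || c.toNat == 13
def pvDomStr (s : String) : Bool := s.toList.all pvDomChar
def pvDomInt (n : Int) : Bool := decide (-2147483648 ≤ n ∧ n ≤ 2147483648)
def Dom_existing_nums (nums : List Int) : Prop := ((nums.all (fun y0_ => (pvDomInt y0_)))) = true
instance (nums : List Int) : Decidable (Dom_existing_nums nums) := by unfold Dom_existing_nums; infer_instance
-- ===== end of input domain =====

-- B replaces A's index-branching enumerate loop by up-front length case analysis with a join
-- over the interior slice (objective: simpler); same return value on every input.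

-- ===== PORT A =====
def existing_nums (nums : List Int) : String :=
  (PySem.List.enumerate nums).foldl
    (fun result p =>
      if p.1 == 0 then " excluding " ++ PySem.Int.toStr p.2
      else if p.1 < (nums.length : Int) - 1 then result ++ (", " ++ PySem.Int.toStr p.2)
      else if nums.length == 2 then result ++ (" and " ++ PySem.Int.toStr p.2)
      else result ++ (", and " ++ PySem.Int.toStr p.2))
    ""

-- ===== PORT B =====
def existing_nums_alt (nums : List Int) : String :=
  if nums = [] then ""
  else
    let parts := nums.map PySem.Int.toStr
    if parts.length = 1 then " excluding " ++ PySem.List.pyGetD parts 0 ""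
    else if parts.length = 2 then
      " excluding " ++ PySem.List.pyGetD parts 0 "" ++ " and " ++ PySem.List.pyGetD parts 1 ""
    else
      " excluding " ++ PySem.List.pyGetD parts 0 "" ++ ", " ++
        PySem.Str.join ", " (PySem.List.slice parts (some 1) (some (-1))) ++
        ", and " ++ PySem.List.pyGetD parts (-1) ""

-- ===== PRECONDITION & SPEC =====
def Spec_existing_nums (nums : List Int) (out : String) : Prop := out = existing_nums_alt nums
instance (nums : List Int) (out : String) : Decidable (Spec_existing_nums nums out) := by unfold Spec_existing_nums; infer_instance

-- ===== CLAIM (what is proved, stated in full; the proofs are below) =====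
def Claim_equal_existing_nums : Prop := ∀ (nums : List Int), Dom_existing_nums nums → Spec_existing_nums nums (existing_nums nums)

-- ===== LEMMAS AND PROOFS =====

/-- The middle part of A's output: one `", " ++ str n` chunk per element. -/
def midA : List Int → String
  | [] => ""
  | n :: t => ", " ++ PySem.Int.toStr n ++ midA t

lemma midA_toList (l : List Int) :
    (midA l).toList = l.flatMap (fun n => (", " : String).toList ++ PySem.Int.toChars n) := by
  induction l with
  | nil => simp [midA]
  | cons x t ih => simp [midA, ih, PySem.Int.toList_toStr]

lemma join_toList (x : Int) (l : List Int) :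
    (PySem.Str.join ", " ((x :: l).map PySem.Int.toStr)).toList
      = PySem.Int.toChars x ++ l.flatMap (fun n => (", " : String).toList ++ PySem.Int.toChars n) := by
  induction l generalizing x with
  | nil => simp [PySem.Str.toList_join, PySem.Chars.join_singleton, PySem.Int.toList_toStr]
  | cons y t ih =>
      have step : (PySem.Str.join ", " ((x :: y :: t).map PySem.Int.toStr)).toList
          = PySem.Int.toChars x ++ (", " : String).toList
            ++ (PySem.Str.join ", " ((y :: t).map PySem.Int.toStr)).toList := by
        simp [PySem.Str.toList_join, PySem.Chars.join_cons_cons, PySem.Int.toList_toStr]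
      rw [step, ih y]
      simp

lemma slice_one_neg_one {α : Type} (l : List α) :
    PySem.List.slice l (some 1) (some (-1)) = l.tail.dropLast := by
  simp [PySem.List.slice, PySem.List.clampIdx]
  rcases l with _ | ⟨x, t⟩
  · simp
  · simp [List.dropLast_eq_take]

lemma loopA (L : Nat) (hL : 3 ≤ L) (xs : List Int) (z : Int) (i : Nat) (hi : 1 ≤ i)
    (h : i + xs.length + 1 = L) (acc : String) :
    (PySem.List.enumerate (xs ++ [z]) (i : Int)).foldl
      (fun result p =>
        if p.1 == 0 then " excluding " ++ PySem.Int.toStr p.2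
        else if p.1 < (L : Int) - 1 then result ++ (", " ++ PySem.Int.toStr p.2)
        else if L == 2 then result ++ (" and " ++ PySem.Int.toStr p.2)
        else result ++ (", and " ++ PySem.Int.toStr p.2)) acc
      = acc ++ midA xs ++ (", and " ++ PySem.Int.toStr z) := by
  induction xs generalizing i acc with
  | nil =>
      simp at h
      simp [PySem.List.enumerate_cons, PySem.List.enumerate_nil, List.foldl, midA]
      have h0 : ¬ ((i : Int) == 0) = true := by simp; omega
      have h1 : ¬ ((i : Int) < (L : Int) - 1) := by omega
      have i0 : i ≠ 0 := by omega
      have L2 : L ≠ 2 := by omega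
      simp [h1, i0, L2]
  | cons x t ih =>
      have e : ((x :: t) ++ [z]) = x :: (t ++ [z]) := rfl
      rw [e, PySem.List.enumerate_cons, List.foldl_cons]
      have h0 : ¬ ((i : Int) == 0) = true := by simp; omega
      have h1 : ((i : Int) < (L : Int) - 1) := by simp at h ⊢; omega
      simp only [h0, h1, if_pos, Bool.false_eq_true, if_false]
      have := ih (i + 1) (by omega) (by simp at h ⊢; omega) (acc ++ (", " ++ PySem.Int.toStr x))
      push_cast at this ⊢
      rw [this]
      refine String.toList_inj.mp ?_
      simp [midA]

lemma case3 (a b c : Int) (t : List Int) :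
    existing_nums (a :: b :: c :: t) = existing_nums_alt (a :: b :: c :: t) := by
  unfold existing_nums existing_nums_alt
  rw [if_neg (by simp : ¬(a :: b :: c :: t) = ([] : List Int))]
  dsimp only
  rw [if_neg (show ¬((a :: b :: c :: t).map PySem.Int.toStr).length = 1 from by simp),
      if_neg (show ¬((a :: b :: c :: t).map PySem.Int.toStr).length = 2 from by simp)]
  rcases List.eq_nil_or_concat (b :: c :: t) with h | ⟨xs, z, hxz⟩
  · simp at h
  have hlen : xs.length = t.length + 1 := by
    have := congrArg List.length hxz; simp at this; omega
  rcases xs with _ | ⟨x, xs'⟩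
  · simp at hlen
  rw [hxz]
  simp only [List.concat_eq_append]
  -- A side
  rw [show (a :: ((x :: xs') ++ [z])) = [a] ++ ((x :: xs') ++ [z]) from rfl,
      PySem.List.enumerate_append]
  simp only [PySem.List.enumerate_cons, PySem.List.enumerate_nil, List.length_cons,
    List.singleton_append, List.foldl_cons]
  rw [show ((0:Int) == 0) = true from rfl]
  simp only [if_true]
  have hL : 3 ≤ (a :: ((x :: xs') ++ [z])).length := by simp
  have := loopA ((a :: ((x :: xs') ++ [z])).length) hL (x :: xs') z 1 (by omega) (by simp; omega) (" excluding " ++ PySem.Int.toStr a)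
  simp only [List.length_cons] at this ⊢
  push_cast at this ⊢
  simp only [List.length_nil, Nat.cast_zero, zero_add] at this ⊢
  rw [this]
  -- B side
  simp only [List.map_cons, List.map_append, List.map_nil]
  refine String.toList_inj.mp ?_
  rw [show (PySem.Int.toStr a :: (PySem.Int.toStr x :: xs'.map PySem.Int.toStr ++ PySem.Int.toStr z :: ([] : List String))) = (PySem.Int.toStr a :: PySem.Int.toStr x :: xs'.map PySem.Int.toStr) ++ [PySem.Int.toStr z] from rfl]
  rw [PySem.List.pyGetD_neg_one_append_singleton, slice_one_neg_one]
  rw [show (PySem.Int.toStr a :: PySem.Int.toStr x :: List.map PySem.Int.toStr xs' ++ [PySem.Int.toStr z]).tail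
        = (PySem.Int.toStr x :: List.map PySem.Int.toStr xs') ++ [PySem.Int.toStr z] from rfl,
      List.dropLast_concat,
      show (PySem.Int.toStr x :: List.map PySem.Int.toStr xs') = (x :: xs').map PySem.Int.toStr from rfl]
  rw [show PySem.List.pyGetD (PySem.Int.toStr a :: (x :: xs').map PySem.Int.toStr ++ [PySem.Int.toStr z]) 0 "" = PySem.Int.toStr a by simp [PySem.List.pyGetD_zero]]
  simp only [String.toList_append, midA_toList, join_toList]
  simp [PySem.Int.toList_toStr]

-- ===== VERDICT (by name: the statement is the Claim_ definition above) =====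
theorem existing_nums_spec : Claim_equal_existing_nums := by
  intro nums _
  unfold Spec_existing_nums
  match nums with
  | [] => rfl
  | [a] =>
      unfold existing_nums existing_nums_alt
      simp [PySem.List.enumerate_cons, PySem.List.enumerate_nil, PySem.List.pyGetD_zero]
  | [a, b] =>
      unfold existing_nums existing_nums_alt
      simp [PySem.List.enumerate_cons, PySem.List.enumerate_nil, PySem.List.pyGetD]
      exact String.toList_inj.mp (by simp)
  | a :: b :: c :: t => exact case3 a b c t
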